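-- pv_equiv track=rewrite | github.com/yeoadonis/Spotify-Data-Analysis | bulls_cows_Duc_Andy_Maxime_Yann.py | valide_code
-- ===== SOURCE A (Python) =====
-- def valide_code(code):
--     if len(code) != 4:
--         return False
--     for i in range(4):
--         if not code[i].isdigit():
--             return False
--         for j in range(i+1, 4):
--             if code[i] == code[j]:
--                 return False
--     return True
-- ===== SOURCE B (Python) =====
-- def valide_code(code):
--     if len(code) != 4:
--         return False
--     chars = [code[i] for i in range(4)]
--     return all(c.isdigit() for c in chars) and len(set(chars)) == 4
-- ===== Notes on version B (the rewrite author's own statement) =====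
-- stated objective: simpler
-- what changed: Replaces the nested pairwise O(n^2) distinctness scan with a single pass: gather the four characters, check all are digits, and test distinctness via the size of the set built from them.
import Mathlib
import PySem

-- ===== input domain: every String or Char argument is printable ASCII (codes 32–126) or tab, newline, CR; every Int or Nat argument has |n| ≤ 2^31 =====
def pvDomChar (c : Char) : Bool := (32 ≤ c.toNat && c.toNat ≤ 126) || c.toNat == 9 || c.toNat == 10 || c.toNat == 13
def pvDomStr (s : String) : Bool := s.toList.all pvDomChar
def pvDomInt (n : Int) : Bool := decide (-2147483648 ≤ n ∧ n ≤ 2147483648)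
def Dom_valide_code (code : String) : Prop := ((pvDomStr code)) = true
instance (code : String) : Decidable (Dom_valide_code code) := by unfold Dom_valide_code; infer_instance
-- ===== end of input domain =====

-- B replaces A's nested pairwise distinctness scan with a single set-building pass (simpler, same cost).

-- ===== PORT A =====
-- A's body over the character list: length guard, then the nested range(4) × range(i+1,4) loops with early-return semantics as `all`.
def valide_code_list (cs : List Char) : Bool :=
  if cs.length ≠ 4 then false
  else
    (PySem.List.pyRange 0 4 1).all (fun i =>
      PySem.Chars.isdigit (PySem.List.pyGetD cs i ' ') &&
      (PySem.List.pyRange (i + 1) 4 1).all (fun j =>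
        PySem.List.pyGetD cs i ' ' ≠ PySem.List.pyGetD cs j ' '))

def valide_code (code : String) : Bool := valide_code_list code.toList

-- ===== PORT B =====
-- B's body: length guard, gather chars = [code[i] for i in range(4)], all-digits check, set-size distinctness check.
def valide_code_alt_list (cs : List Char) : Bool :=
  if cs.length ≠ 4 then false
  else
    let chars := (PySem.List.pyRange 0 4 1).map (fun i => PySem.List.pyGetD cs i ' ')
    chars.all PySem.Chars.isdigit && (PySem.Set.ofList chars).length == 4

def valide_code_alt (code : String) : Bool := valide_code_alt_list code.toList

-- ===== PRECONDITION & SPEC =====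
def Spec_valide_code (code : String) (out : Bool) : Prop := out = valide_code_alt code
instance (code : String) (out : Bool) : Decidable (Spec_valide_code code out) := by unfold Spec_valide_code; infer_instance

-- ===== CLAIM (what is proved, stated in full; the proofs are below) =====
def Claim_equal_valide_code : Prop := ∀ (code : String), Dom_valide_code code → Spec_valide_code code (valide_code code)

-- ===== LEMMAS AND PROOFS =====
-- On a four-character list the pairwise scan and the set-size test agree: case split on the six equalities.
lemma valide_code_core (a b c d : Char) :
    valide_code_list [a, b, c, d] = valide_code_alt_list [a, b, c, d] := by
  have hr : PySem.List.pyRange 0 4 1 = [0, 1, 2, 3] := by decide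
  have hr1 : PySem.List.pyRange (0 + 1) 4 1 = [1, 2, 3] := by decide
  have hr2 : PySem.List.pyRange (1 + 1) 4 1 = [2, 3] := by decide
  have hr3 : PySem.List.pyRange (2 + 1) 4 1 = [3] := by decide
  have hr4 : PySem.List.pyRange (3 + 1) 4 1 = [] := by decide
  simp only [valide_code_list, valide_code_alt_list, hr, List.all_cons, List.all_nil,
    List.map_cons, List.map_nil, hr1, hr2, hr3, hr4]
  simp [PySem.List.pyGetD, PySem.List.pyGet?, PySem.List.pyIdx?,
    PySem.Set.ofList, PySem.Set.add, PySem.Set.contains]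
  by_cases hab : b = a <;> by_cases hac : a = c <;> by_cases had : a = d <;>
    by_cases hbc : b = c <;> by_cases hbd : b = d <;> by_cases hcd : c = d <;>
    simp_all <;> (intros; split_ifs <;> simp_all) <;> simp_all [eq_comm]

-- Lists of length ≠ 4: both guards return false.
lemma valide_code_short (cs : List Char) (h : cs.length ≠ 4) :
    valide_code_list cs = valide_code_alt_list cs := by
  simp [valide_code_list, valide_code_alt_list, h]

-- ===== VERDICT (by name: the statement is the Claim_ definition above) =====
theorem valide_code_spec : Claim_equal_valide_code := by
  intro code _
  unfold Spec_valide_code valide_code valide_code_alt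
  match h : code.toList with
  | [a, b, c, d] => exact valide_code_core a b c d
  | [] => exact valide_code_short _ (by simp)
  | [_] => exact valide_code_short _ (by simp)
  | [_, _] => exact valide_code_short _ (by simp)
  | [_, _, _] => exact valide_code_short _ (by simp)
  | _ :: _ :: _ :: _ :: _ :: _ => exact valide_code_short _ (by simp)
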